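-- pv_equiv track=rewrite | github.com/yortos/imessage-analysis | src/helper.py | extract_ascii_text
-- ===== SOURCE A (Python) =====
-- def extract_ascii_text(byte_string):
--     extracted_text = ""
--
--     for byte in byte_string:
--         char = chr(byte)
--         if char.isprintable() or char in ['\n', '\t', ' ']:
--             extracted_text += char
--         else:
--             extracted_text += " "
--
--     return extracted_text
-- ===== SOURCE B (Python) =====
-- # Table-driven: precompute a 256-entry translation table once; the per-byte
-- # printable/whitespace decision disappears from the loop (single translate pass).
-- _TRANS = str.maketrans({i: (chr(i) if chr(i).isprintable() or chr(i) in '\n\t ' else ' ')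
--                         for i in range(256)})
--
-- def extract_ascii_text(byte_string):
--     return bytes(byte_string).decode('latin-1').translate(_TRANS)
-- ===== Notes on version B (the rewrite author's own statement) =====
-- stated objective: idiomatic
-- what changed: Replaces the per-character isprintable test and string concatenation inside the loop with a precomputed 256-entry str.maketrans table applied in a single decode+translate pass.
-- outside the precondition, e.g. on extract_ascii_text([300]): A returns 'Ĭ', B raises ValueError
import Mathlib
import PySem

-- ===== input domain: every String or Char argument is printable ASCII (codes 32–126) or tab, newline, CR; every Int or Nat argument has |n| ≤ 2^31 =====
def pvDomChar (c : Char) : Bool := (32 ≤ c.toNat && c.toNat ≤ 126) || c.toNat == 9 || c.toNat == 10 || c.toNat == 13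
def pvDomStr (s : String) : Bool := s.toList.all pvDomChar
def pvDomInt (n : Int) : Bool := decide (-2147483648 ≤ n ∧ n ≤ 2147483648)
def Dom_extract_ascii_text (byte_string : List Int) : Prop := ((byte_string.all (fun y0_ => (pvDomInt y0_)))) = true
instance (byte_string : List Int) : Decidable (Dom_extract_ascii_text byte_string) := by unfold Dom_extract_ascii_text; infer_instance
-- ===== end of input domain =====

-- B replaces A's in-loop printable test and string concatenation with one
-- precomputed 256-entry translation table applied in a single pass (idiomatic).

-- ===== PORT A =====
-- chr(b).isprintable() for a code point b < 256: exact on byte code points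
-- (guaranteed by Pre_); printable bytes are 32–126 and 161–255 except 173.
def pvBytePrintable (c : Char) : Bool :=
  (32 ≤ c.toNat && c.toNat ≤ 126) || (161 ≤ c.toNat && c.toNat ≤ 255 && !(c.toNat == 173))

-- the accumulated string is kept as a List Char (String.ofList at the end)
def extract_ascii_text (byte_string : List Int) : String :=
  String.ofList (byte_string.foldl
    (fun extracted_text byte =>
      let char := Char.ofNat byte.toNat   -- chr(byte); byte in 0..255 by Pre_
      if pvBytePrintable char || (char == '\n' || char == '\t' || char == ' ') then
        extracted_text ++ [char]
      else
        extracted_text ++ [' ']) [])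

-- ===== PORT B =====
-- the 256-entry table of Source B's str.maketrans dict: entry i is chr(i) if it is
-- printable or '\n'/'\t'/' ', else ' '  (byte printability as in pvBytePrintable)
def pvTable : List Char :=
  (List.range 256).map (fun i =>
    if ((32 ≤ i && i ≤ 126) || (161 ≤ i && i ≤ 255 && !(i == 173)))
        || i == 9 || i == 10 || i == 32 then Char.ofNat i else ' ')

def extract_ascii_text_alt (byte_string : List Int) : String :=
  -- decode('latin-1').translate(_TRANS): one table lookup per byte
  String.ofList (byte_string.map (fun b => pvTable.getD b.toNat ' '))

-- ===== PRECONDITION & SPEC =====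
-- Pre_ restricts to the function's natural bytes domain 0–255: outside it
-- chr raises ValueError (negative or > 0x10FFFF) or yields non-Latin-1 code
-- points whose isprintable answer comes from the Unicode database (not
-- portable), and Source B's bytes(byte_string) raises ValueError there as well.
def Pre_extract_ascii_text (byte_string : List Int) : Prop :=
  (byte_string.all (fun b => decide (0 ≤ b ∧ b ≤ 255))) = true
instance (byte_string : List Int) : Decidable (Pre_extract_ascii_text byte_string) := by
  unfold Pre_extract_ascii_text; infer_instance

def pvWitness_extract_ascii_text : List Int := [72, 0, 105, 9, 200, 173]

def Spec_extract_ascii_text (byte_string : List Int) (out : String) : Prop :=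
  out = extract_ascii_text_alt byte_string
instance (byte_string : List Int) (out : String) : Decidable (Spec_extract_ascii_text byte_string out) := by
  unfold Spec_extract_ascii_text; infer_instance

-- ===== CLAIM (what is proved, stated in full; the proofs are below) =====
def Claim_equal_extract_ascii_text : Prop :=
  ∀ (byte_string : List Int), Dom_extract_ascii_text byte_string →
    Pre_extract_ascii_text byte_string →
    Spec_extract_ascii_text byte_string (extract_ascii_text byte_string)

-- ===== LEMMAS AND PROOFS =====
set_option maxRecDepth 4096

-- per-byte agreement of A's branch with B's table, for all byte values
theorem pv_cell_eq : ∀ n : Nat, n < 256 →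
    (let char := Char.ofNat n
     if pvBytePrintable char || (char == '\n' || char == '\t' || char == ' ') then char
     else ' ') = pvTable.getD n ' ' := by
  decide

-- ===== VERDICT (by name: the statement is the Claim_ definition above) =====
theorem extract_ascii_text_spec : Claim_equal_extract_ascii_text := by
  intro bs _ hpre
  unfold Spec_extract_ascii_text extract_ascii_text extract_ascii_text_alt
  congr 1
  have hstep : bs.foldl
      (fun extracted_text byte =>
        let char := Char.ofNat byte.toNat
        if pvBytePrintable char || (char == '\n' || char == '\t' || char == ' ') then
          extracted_text ++ [char]
        else
          extracted_text ++ [' ']) [] =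
      bs.foldl (fun acc b => acc ++ [pvTable.getD b.toNat ' ']) [] := by
    apply PySem.List.foldl_congr_mem
    intro acc b hb
    have hb' : 0 ≤ b ∧ b ≤ 255 := of_decide_eq_true ((List.all_eq_true.mp hpre) b hb)
    have hlt : b.toNat < 256 := by omega
    have hcell := pv_cell_eq b.toNat hlt
    simp only at hcell ⊢
    by_cases hc : (pvBytePrintable (Char.ofNat b.toNat)
        || (Char.ofNat b.toNat == '\n' || Char.ofNat b.toNat == '\t' || Char.ofNat b.toNat == ' ')) = true
    · rw [if_pos hc] at hcell ⊢
      rw [hcell]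
    · rw [if_neg hc] at hcell
      rw [if_neg hc, ← hcell]
  rw [hstep, PySem.List.foldl_append_singleton_eq_map]
  simp
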